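-- pv_equiv track=rewrite | github.com/ruilvo/radioamadorismo-website | backend/aprs/vendor/passcode.py | passcode_generator
-- ===== SOURCE A (Python) =====
-- def passcode_generator(callsign: str) -> int:
--     """
--     Uses the hashing algorithm to generate a passcode for a given callsign.
--     From https://apps.magicbug.co.uk/passcode/
--     """
--     callsign_clean = callsign.split("-")[0].upper()
--     callsign_bytes = callsign_clean.encode("ascii")
--
--     result_hash = 0x73E2
--     shift = True
--     for char in callsign_bytes:
--         if shift:
--             result_hash ^= char << 8
--         else:
--             result_hash ^= char
--         shift = not shift
--     result_hash &= 0x7FFF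
--
--     return result_hash
-- ===== SOURCE B (Python) =====
-- def passcode_generator(callsign: str) -> int:
--     """
--     Same APRS passcode hash, computed as two strided XOR passes:
--     even-indexed bytes are XORed shifted left by 8, odd-indexed bytes plain,
--     then both partial accumulators are XORed into the 0x73E2 seed.
--     """
--     callsign_clean = callsign.split("-")[0].upper()
--     callsign_bytes = callsign_clean.encode("ascii")
--
--     even = 0
--     for c in callsign_bytes[0::2]:
--         even ^= c << 8
--     odd = 0
--     for c in callsign_bytes[1::2]:
--         odd ^= c
--
--     return (0x73E2 ^ even ^ odd) & 0x7FFF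
-- ===== Notes on version B (the rewrite author's own statement) =====
-- stated objective: alternative
-- what changed: Replaces the single pass with a toggling shift flag by two strided passes (even-indexed bytes folded shifted, odd-indexed bytes folded plain) whose partial XOR accumulators are combined with the seed at the end, justified by commutativity of XOR.
import Mathlib
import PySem

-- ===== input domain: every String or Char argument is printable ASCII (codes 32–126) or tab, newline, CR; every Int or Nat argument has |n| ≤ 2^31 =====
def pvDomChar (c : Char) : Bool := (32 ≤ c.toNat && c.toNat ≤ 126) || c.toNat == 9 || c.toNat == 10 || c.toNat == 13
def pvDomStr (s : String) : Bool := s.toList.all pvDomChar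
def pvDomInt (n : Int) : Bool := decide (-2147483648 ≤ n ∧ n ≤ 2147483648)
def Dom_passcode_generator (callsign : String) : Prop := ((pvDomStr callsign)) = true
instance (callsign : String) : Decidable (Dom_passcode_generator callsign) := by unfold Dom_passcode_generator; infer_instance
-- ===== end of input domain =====

-- B computes the same APRS passcode with two strided XOR passes (even/odd byte positions)
-- instead of A's single pass with a toggling shift flag; alternative decomposition, same cost.


-- ===== PORT A =====
-- split? is some for the nonempty separator "-" and always a nonempty list, so [0] is getD [] then head
def passcode_generator (callsign : String) : Int :=
  let callsign_clean := PySem.Str.upper (((PySem.Str.split? callsign "-").getD []).headD "")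
  let callsign_bytes : List Int := callsign_clean.toList.map (fun c => (c.toNat : Int))
  let result_hash :=
    (callsign_bytes.foldl
      (fun (st : Int × Bool) (char : Int) =>
        (if st.2 then PySem.Int.bxor st.1 (char <<< 8) else PySem.Int.bxor st.1 char, !st.2))
      (0x73E2, true)).1
  PySem.Int.band result_hash 0x7FFF

-- ===== PORT B =====
-- hand port of the step-2 slice bytes[0::2] (exact: every second element from the front)
def pvEveryOther : List Int → List Int
  | [] => []
  | [x] => [x]
  | x :: _ :: rest => x :: pvEveryOther rest

-- bytes[1::2] is ported as pvEveryOther of the tail (exact: every second element from index 1)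
def passcode_generator_alt (callsign : String) : Int :=
  let callsign_clean := PySem.Str.upper (((PySem.Str.split? callsign "-").getD []).headD "")
  let callsign_bytes : List Int := callsign_clean.toList.map (fun c => (c.toNat : Int))
  let even := (pvEveryOther callsign_bytes).foldl (fun (a : Int) (c : Int) => PySem.Int.bxor a (c <<< 8)) 0
  let odd := (pvEveryOther callsign_bytes.tail).foldl PySem.Int.bxor 0
  PySem.Int.band (PySem.Int.bxor (PySem.Int.bxor 0x73E2 even) odd) 0x7FFF

-- ===== PRECONDITION & SPEC =====
def Spec_passcode_generator (callsign : String) (out : Int) : Prop := out = passcode_generator_alt callsign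
instance (callsign : String) (out : Int) : Decidable (Spec_passcode_generator callsign out) := by unfold Spec_passcode_generator; infer_instance

-- ===== CLAIM (what is proved, stated in full; the proofs are below) =====
def Claim_equal_passcode_generator : Prop := ∀ (callsign : String), Dom_passcode_generator callsign → Spec_passcode_generator callsign (passcode_generator callsign)

-- ===== LEMMAS AND PROOFS =====

-- Nat-level mirror of pvEveryOther
def pvEveryOtherN : List Nat → List Nat
  | [] => []
  | [x] => [x]
  | x :: _ :: rest => x :: pvEveryOtherN rest

theorem pvEveryOther_map (ns : List Nat) :
    pvEveryOther (ns.map (fun (n : Nat) => (n : Int))) = (pvEveryOtherN ns).map (fun (n : Nat) => (n : Int)) := by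
  induction ns using pvEveryOtherN.induct <;> simp [pvEveryOther, pvEveryOtherN, *]

theorem pvEveryOtherN_cons (y : Nat) (r : List Nat) :
    pvEveryOtherN (y :: r) = y :: pvEveryOtherN r.tail := by
  cases r <;> rfl

-- accumulator extraction for the two Nat-level folds
theorem foldE_acc (l : List Nat) (a : Nat) :
    l.foldl (fun x c => x ^^^ (c <<< 8)) a = a ^^^ l.foldl (fun x c => x ^^^ (c <<< 8)) 0 := by
  induction l generalizing a with
  | nil => simp
  | cons c l ih =>
    simp only [List.foldl_cons]
    rw [ih, ih (0 ^^^ (c <<< 8))]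
    simp [Nat.xor_assoc]

theorem foldO_acc (l : List Nat) (a : Nat) :
    l.foldl (· ^^^ ·) a = a ^^^ l.foldl (· ^^^ ·) 0 := by
  induction l generalizing a with
  | nil => simp
  | cons c l ih =>
    simp only [List.foldl_cons]
    rw [ih, ih (0 ^^^ c)]
    simp [Nat.xor_assoc]

-- the A fold from (a, true) equals seed ^ even-pass ^ odd-pass, at the Nat level
theorem fold_split (ns : List Nat) (a : Nat) :
    (ns.foldl (fun (st : Nat × Bool) c =>
        (if st.2 then st.1 ^^^ (c <<< 8) else st.1 ^^^ c, !st.2)) (a, true)).1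
      = a ^^^ (pvEveryOtherN ns).foldl (fun x c => x ^^^ (c <<< 8)) 0
          ^^^ (pvEveryOtherN ns.tail).foldl (· ^^^ ·) 0 := by
  induction ns using pvEveryOtherN.induct generalizing a with
  | case1 => simp [pvEveryOtherN]
  | case2 x => simp [pvEveryOtherN]
  | case3 x y r ih =>
    simp only [List.foldl_cons, if_true, Bool.not_true, Bool.not_false]
    rw [ih]
    rw [show pvEveryOtherN (x :: y :: r) = x :: pvEveryOtherN r from rfl]
    rw [show (x :: y :: r).tail = y :: r from rfl, pvEveryOtherN_cons]
    simp only [List.foldl_cons]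
    rw [foldE_acc (pvEveryOtherN r) (0 ^^^ x <<< 8), foldO_acc (pvEveryOtherN r.tail) (0 ^^^ y)]
    simp [Nat.xor_assoc, Nat.xor_comm, Nat.xor_left_comm]

-- the Int fold of port A over nonnegative bytes reduces to the Nat fold
theorem foldA_natCast (ns : List Nat) (a : Nat) (b : Bool) :
    (List.foldl (fun (st : Int × Bool) (char : Int) =>
        (if st.2 then PySem.Int.bxor st.1 (char <<< 8) else PySem.Int.bxor st.1 char, !st.2))
      ((a : Int), b) (ns.map (fun (n : Nat) => (n : Int)))).1
    = ((ns.foldl (fun (st : Nat × Bool) c =>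
        (if st.2 then st.1 ^^^ (c <<< 8) else st.1 ^^^ c, !st.2)) (a, b)).1 : Int) := by
  induction ns generalizing a b with
  | nil => rfl
  | cons c l ih =>
    cases b <;>
      simpa [Int.natCast_shiftLeft, PySem.Int.bxor_natCast] using ih _ _

theorem foldBE_natCast (ns : List Nat) (a : Nat) :
    List.foldl (fun (x : Int) (c : Int) => PySem.Int.bxor x (c <<< 8)) (a : Int) (ns.map (fun (n : Nat) => (n : Int)))
      = ((ns.foldl (fun x c => x ^^^ (c <<< 8)) a : Nat) : Int) := by
  induction ns generalizing a with
  | nil => rfl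
  | cons c l ih => simpa [Int.natCast_shiftLeft, PySem.Int.bxor_natCast] using ih _

theorem foldBO_natCast (ns : List Nat) (a : Nat) :
    List.foldl PySem.Int.bxor (a : Int) (ns.map (fun (n : Nat) => (n : Int)))
      = ((ns.foldl (· ^^^ ·) a : Nat) : Int) := by
  induction ns generalizing a with
  | nil => rfl
  | cons c l ih => simpa [PySem.Int.bxor_natCast] using ih _

theorem map_tail {α β : Type} (f : α → β) (l : List α) : (l.map f).tail = l.tail.map f := by
  cases l <;> rfl

-- literal-seed corollaries (the ports use numeral seeds, not casts)
theorem foldA_lit (ns : List Nat) :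
    (List.foldl (fun (st : Int × Bool) (char : Int) =>
        (if st.2 then PySem.Int.bxor st.1 (char <<< 8) else PySem.Int.bxor st.1 char, !st.2))
      ((0x73E2 : Int), true) (ns.map (fun (n : Nat) => (n : Int)))).1
    = ((ns.foldl (fun (st : Nat × Bool) c =>
        (if st.2 then st.1 ^^^ (c <<< 8) else st.1 ^^^ c, !st.2)) (0x73E2, true)).1 : Int) := by
  simpa using foldA_natCast ns 0x73E2 true

theorem foldBE_lit (ns : List Nat) :
    List.foldl (fun (x : Int) (c : Int) => PySem.Int.bxor x (c <<< 8)) (0 : Int)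
        (ns.map (fun (n : Nat) => (n : Int)))
      = ((ns.foldl (fun x c => x ^^^ (c <<< 8)) 0 : Nat) : Int) := by
  simpa using foldBE_natCast ns 0

theorem foldBO_lit (ns : List Nat) :
    List.foldl PySem.Int.bxor (0 : Int) (ns.map (fun (n : Nat) => (n : Int)))
      = ((ns.foldl (· ^^^ ·) 0 : Nat) : Int) := by
  simpa using foldBO_natCast ns 0

-- ===== VERDICT (by name: the statement is the Claim_ definition above) =====
theorem passcode_generator_spec : Claim_equal_passcode_generator := by
  intro callsign _
  show passcode_generator callsign = passcode_generator_alt callsign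
  unfold passcode_generator passcode_generator_alt
  have hmap : ∀ l : List Char,
      l.map (fun c => (c.toNat : Int)) = (l.map Char.toNat).map (fun (n : Nat) => (n : Int)) := by
    intro l; rw [List.map_map]; rfl
  simp only [hmap, map_tail, pvEveryOther_map, foldA_lit, foldBE_lit, foldBO_lit, fold_split]
  rw [show (0x73E2 : Int) = ((0x73E2 : Nat) : Int) by norm_num, PySem.Int.bxor_natCast,
    PySem.Int.bxor_natCast]
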